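-- pv_equiv track=rewrite | github.com/xx3nvyxx/challenges | codejam/2008/Practice Problems/B/AlwaysTurnLeft.py | followMaze
-- ===== SOURCE A (Python) =====
-- def followMaze(maze, x, y, angle, steps):
--     for step in steps:
--         if step == "W":
--             if angle == 0:
--                 maze[x,y] = maze.get((x,y), 0) | 8
--                 x += 1
--                 maze[x,y] = maze.get((x,y), 0) | 4
--             if angle == 90:
--                 maze[x,y] = maze.get((x,y), 0) | 1
--                 y += 1
--                 maze[x,y] = maze.get((x,y), 0) | 2
--             if angle == 180:
--                 maze[x,y] = maze.get((x,y), 0) | 4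
--                 x -= 1
--                 maze[x,y] = maze.get((x,y), 0) | 8
--             if angle == 270:
--                 maze[x,y] = maze.get((x,y), 0) | 2
--                 y -= 1
--                 maze[x,y] = maze.get((x,y), 0) | 1
--         if step == "L":
--             angle = (angle + 90) % 360
--         if step == "R":
--             angle = (angle + 270) % 360
--     return (x,y, angle)
-- ===== SOURCE B (Python) =====
-- def followMaze(maze, x, y, angle, steps):
--     # Counting aggregation: tally how many W steps happen at each heading,
--     # then derive the net displacement once at the end. maze is never touched
--     # (A mutates it in place; the return value is what's compared).
--     wall_counts = {}
--     a = angle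
--     for step in steps:
--         if step == "W":
--             wall_counts[a] = wall_counts.get(a, 0) + 1
--         elif step == "L":
--             a = (a + 90) % 360
--         elif step == "R":
--             a = (a + 270) % 360
--     x += wall_counts.get(0, 0) - wall_counts.get(180, 0)
--     y += wall_counts.get(90, 0) - wall_counts.get(270, 0)
--     return (x, y, a)
-- ===== Notes on version B (the rewrite author's own statement) =====
-- stated objective: alternative
-- what changed: B abandons the step-by-step position/maze simulation: it only threads the heading through the steps while tallying W-steps per heading in a counter dict, then computes the final position once from the four counts (net displacement = #W-at-0 minus #W-at-180 for x, #W-at-90 minus #W-at-270 for y); B never reads or writes the maze (A mutates it in place; the equivalence is about the returned triple).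
import Mathlib
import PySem

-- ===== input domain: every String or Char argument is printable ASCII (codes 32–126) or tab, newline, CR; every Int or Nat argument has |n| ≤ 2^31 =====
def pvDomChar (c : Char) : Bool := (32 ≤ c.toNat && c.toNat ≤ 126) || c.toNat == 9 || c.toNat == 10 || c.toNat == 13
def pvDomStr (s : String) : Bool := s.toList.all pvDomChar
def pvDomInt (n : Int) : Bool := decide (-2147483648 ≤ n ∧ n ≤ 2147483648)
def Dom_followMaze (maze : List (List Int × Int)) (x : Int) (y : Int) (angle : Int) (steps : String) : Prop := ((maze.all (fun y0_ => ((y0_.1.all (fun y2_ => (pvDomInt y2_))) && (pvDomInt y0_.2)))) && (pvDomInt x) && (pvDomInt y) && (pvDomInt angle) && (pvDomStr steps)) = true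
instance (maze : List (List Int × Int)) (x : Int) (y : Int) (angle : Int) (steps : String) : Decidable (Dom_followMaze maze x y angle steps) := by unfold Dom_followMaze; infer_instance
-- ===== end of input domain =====

-- B replaces A's step-by-step position simulation by a counter of W-steps per heading, deriving the final
-- position once from the four counts; B never touches maze (A mutates it in place — the equivalence proved
-- here is about the returned (x, y, angle) triple only). Objective: alternative.

-- ===== PORT A =====
-- one loop iteration of A: sequential ifs in A's order, threading (maze, x, y, angle)
def followMazeStepA (s : PySem.Dict (List Int) Int × Int × Int × Int) (step : Char) :
    PySem.Dict (List Int) Int × Int × Int × Int :=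
  let (m, x, y, angle) := s
  let (m, x, y) :=
    if step = 'W' then
      let (m, x, y) :=
        if angle = 0 then
          let m := m.insert [x, y] (PySem.Int.bor (m.getD [x, y] 0) 8)
          let x := x + 1
          (m.insert [x, y] (PySem.Int.bor (m.getD [x, y] 0) 4), x, y)
        else (m, x, y)
      let (m, x, y) :=
        if angle = 90 then
          let m := m.insert [x, y] (PySem.Int.bor (m.getD [x, y] 0) 1)
          let y := y + 1
          (m.insert [x, y] (PySem.Int.bor (m.getD [x, y] 0) 2), x, y)
        else (m, x, y)
      let (m, x, y) :=
        if angle = 180 then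
          let m := m.insert [x, y] (PySem.Int.bor (m.getD [x, y] 0) 4)
          let x := x - 1
          (m.insert [x, y] (PySem.Int.bor (m.getD [x, y] 0) 8), x, y)
        else (m, x, y)
      if angle = 270 then
        let m := m.insert [x, y] (PySem.Int.bor (m.getD [x, y] 0) 2)
        let y := y - 1
        (m.insert [x, y] (PySem.Int.bor (m.getD [x, y] 0) 1), x, y)
      else (m, x, y)
    else (m, x, y)
  let angle := if step = 'L' then PySem.Int.mod (angle + 90) 360 else angle
  let angle := if step = 'R' then PySem.Int.mod (angle + 270) 360 else angle
  (m, x, y, angle)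

def followMaze (maze : List (List Int × Int)) (x : Int) (y : Int) (angle : Int) (steps : String) : List Int :=
  let r := steps.toList.foldl followMazeStepA (PySem.Dict.ofList maze, x, y, angle)
  [r.2.1, r.2.2.1, r.2.2.2]

-- ===== PORT B =====
-- one loop iteration of B: tally a W-step under the current heading, or turn
def followMazeStepB (s : PySem.Dict Int Int × Int) (step : Char) : PySem.Dict Int Int × Int :=
  let (c, a) := s
  if step = 'W' then (c.insert a (c.getD a 0 + 1), a)
  else if step = 'L' then (c, PySem.Int.mod (a + 90) 360)
  else if step = 'R' then (c, PySem.Int.mod (a + 270) 360)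
  else (c, a)

def followMaze_alt (maze : List (List Int × Int)) (x : Int) (y : Int) (angle : Int) (steps : String) : List Int :=
  let r := steps.toList.foldl followMazeStepB (PySem.Dict.empty, angle)
  let c := r.1
  [x + c.getD 0 0 - c.getD 180 0, y + c.getD 90 0 - c.getD 270 0, r.2]

-- ===== PRECONDITION & SPEC =====
def Spec_followMaze (maze : List (List Int × Int)) (x : Int) (y : Int) (angle : Int) (steps : String) (out : List Int) : Prop := out = followMaze_alt maze x y angle steps
instance (maze : List (List Int × Int)) (x : Int) (y : Int) (angle : Int) (steps : String) (out : List Int) : Decidable (Spec_followMaze maze x y angle steps out) := by unfold Spec_followMaze; infer_instance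

-- ===== CLAIM =====
def Claim_equal_followMaze : Prop := ∀ (maze : List (List Int × Int)) (x : Int) (y : Int) (angle : Int) (steps : String), Dom_followMaze maze x y angle steps → Spec_followMaze maze x y angle steps (followMaze maze x y angle steps)

-- ===== LEMMAS AND PROOFS =====

-- maze-free shadow of A's step: the (x, y, angle) component of followMazeStepA
def moveA (p : Int × Int × Int) (step : Char) : Int × Int × Int :=
  let (x, y, angle) := p
  let (x, y) :=
    if step = 'W' then
      let x := if angle = 0 then x + 1 else x
      let y := if angle = 90 then y + 1 else y
      let x := if angle = 180 then x - 1 else x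
      let y := if angle = 270 then y - 1 else y
      (x, y)
    else (x, y)
  let angle := if step = 'L' then PySem.Int.mod (angle + 90) 360 else angle
  let angle := if step = 'R' then PySem.Int.mod (angle + 270) 360 else angle
  (x, y, angle)

theorem stepA_proj (m : PySem.Dict (List Int) Int) (x y angle : Int) (ch : Char) :
    (followMazeStepA (m, x, y, angle) ch).2 = moveA (x, y, angle) ch := by
  by_cases hW : ch = 'W'
  · subst hW
    by_cases h0 : angle = 0 <;> by_cases h90 : angle = 90 <;>
      by_cases h180 : angle = 180 <;> by_cases h270 : angle = 270 <;>
      simp_all [followMazeStepA, moveA]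
  · simp [followMazeStepA, moveA, hW]

theorem foldA_proj (l : List Char) :
    ∀ (m : PySem.Dict (List Int) Int) (x y angle : Int),
    (l.foldl followMazeStepA (m, x, y, angle)).2 = l.foldl moveA (x, y, angle) := by
  induction l with
  | nil => intro m x y angle; rfl
  | cons ch l ih =>
    intro m x y angle
    simp only [List.foldl_cons]
    rcases hs : followMazeStepA (m, x, y, angle) ch with ⟨m', x', y', a'⟩
    have hp := stepA_proj m x y angle ch
    rw [hs] at hp
    simp only [ih, ← hp]

-- net x/y displacement encoded in B's counter
def cntX (c : PySem.Dict Int Int) : Int := c.getD 0 0 - c.getD 180 0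
def cntY (c : PySem.Dict Int Int) : Int := c.getD 90 0 - c.getD 270 0

-- loop invariant: the maze-free fold and B's counter fold stay in lockstep — same heading, and the
-- position equals the start position plus the growth of the counter sums.
theorem loop_invariant (l : List Char) :
    ∀ (x y angle : Int) (c : PySem.Dict Int Int),
    (l.foldl moveA (x, y, angle)).1
      = x + cntX ((l.foldl followMazeStepB (c, angle)).1) - cntX c ∧
    (l.foldl moveA (x, y, angle)).2.1
      = y + cntY ((l.foldl followMazeStepB (c, angle)).1) - cntY c ∧
    (l.foldl moveA (x, y, angle)).2.2
      = (l.foldl followMazeStepB (c, angle)).2 := by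
  induction l with
  | nil => intro x y angle c; simp
  | cons ch l ih =>
    intro x y angle c
    by_cases hW : ch = 'W'
    · subst hW
      by_cases h0 : angle = 0
      · subst h0
        simp only [List.foldl_cons, moveA, followMazeStepB]
        obtain ⟨hx, hy, ha⟩ := ih (x + 1) y 0 (c.insert 0 (c.getD 0 0 + 1))
        refine ⟨?_, ?_, ?_⟩ <;>
          simp_all [cntX, cntY, PySem.Dict.getD_insert] <;> omega
      · by_cases h90 : angle = 90
        · subst h90
          simp only [List.foldl_cons, moveA, followMazeStepB]
          obtain ⟨hx, hy, ha⟩ := ih x (y + 1) 90 (c.insert 90 (c.getD 90 0 + 1))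
          refine ⟨?_, ?_, ?_⟩ <;>
            simp_all [cntX, cntY, PySem.Dict.getD_insert] <;> omega
        · by_cases h180 : angle = 180
          · subst h180
            simp only [List.foldl_cons, moveA, followMazeStepB]
            obtain ⟨hx, hy, ha⟩ := ih (x - 1) y 180 (c.insert 180 (c.getD 180 0 + 1))
            refine ⟨?_, ?_, ?_⟩ <;>
              simp_all [cntX, cntY, PySem.Dict.getD_insert] <;> omega
          · by_cases h270 : angle = 270
            · subst h270
              simp only [List.foldl_cons, moveA, followMazeStepB]
              obtain ⟨hx, hy, ha⟩ := ih x (y - 1) 270 (c.insert 270 (c.getD 270 0 + 1))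
              refine ⟨?_, ?_, ?_⟩ <;>
                simp_all [cntX, cntY, PySem.Dict.getD_insert] <;> omega
            · -- W at a heading outside {0,90,180,270}: no move; the tally leaves the four counts unchanged
              simp only [List.foldl_cons, moveA, followMazeStepB]
              obtain ⟨hx, hy, ha⟩ := ih x y angle (c.insert angle (c.getD angle 0 + 1))
              refine ⟨?_, ?_, ?_⟩ <;>
                simp_all [cntX, cntY, PySem.Dict.getD_insert,
                  Ne.symm h0, Ne.symm h90, Ne.symm h180, Ne.symm h270]
    · by_cases hL : ch = 'L'
      · subst hL
        simp only [List.foldl_cons, moveA, followMazeStepB]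
        exact ih x y (PySem.Int.mod (angle + 90) 360) c
      · by_cases hR : ch = 'R'
        · subst hR
          simp only [List.foldl_cons, moveA, followMazeStepB]
          exact ih x y (PySem.Int.mod (angle + 270) 360) c
        · simp only [List.foldl_cons, moveA, followMazeStepB, if_neg hW, if_neg hL, if_neg hR]
          exact ih x y angle c

-- ===== VERDICT =====
theorem followMaze_spec : Claim_equal_followMaze := by
  intro maze x y angle steps _
  unfold Spec_followMaze followMaze followMaze_alt
  have hproj := foldA_proj steps.toList (PySem.Dict.ofList maze) x y angle
  obtain ⟨hx, hy, ha⟩ := loop_invariant steps.toList x y angle PySem.Dict.empty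
  simp only [hproj, hx, hy, ha, cntX, cntY, PySem.Dict.getD_empty, List.cons.injEq, and_true]
  omega
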